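-- pv_equiv track=rewrite | github.com/rddtz/byte-a-byte | scripts/generate_manifest.py | parse_frontmatter
-- ===== SOURCE A (Python) =====
-- def parse_frontmatter(text):
--     if not text.startswith("---"):
--         return {}, text
--     end = text.find("---", 3)
--     if end == -1:
--         return {}, text
--     fm_text = text[3:end].strip()
--     body = text[end + 3:].strip()
--     fields = {}
--     lines = fm_text.splitlines()
--     i = 0
--     while i < len(lines):
--         line = lines[i]
--         if ":" not in line:
--             i += 1
--             continue
--         key, _, value = line.partition(":")
--         key = key.strip()
--         value = value.strip().strip('"\'')
--         if value == "|":
--             block = []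
--             i += 1
--             while i < len(lines) and (lines[i].startswith("  ") or lines[i].strip() == ""):
--                 block.append(lines[i][2:] if lines[i].startswith("  ") else "")
--                 i += 1
--             fields[key] = "\n".join(block).rstrip()
--         else:
--             fields[key] = value
--             i += 1
--     return fields, body
-- ===== SOURCE B (Python) =====
-- def parse_frontmatter(text):
--     if not text.startswith("---"):
--         return {}, text
--     end = text.find("---", 3)
--     if end == -1:
--         return {}, text
--     body = text[end + 3:].strip()
--     fields = {}
--     block_key = None
--     block_acc = []
--
--     def flush():
--         nonlocal block_key
--         if block_key is not None:
--             fields[block_key] = "\n".join(block_acc).rstrip()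
--             block_key = None
--
--     for line in text[3:end].strip().splitlines():
--         if block_key is not None:
--             if line.startswith("  "):
--                 block_acc.append(line[2:])
--                 continue
--             if line.strip() == "":
--                 block_acc.append("")
--                 continue
--             flush()
--         if ":" in line:
--             key, _, value = line.partition(":")
--             value = value.strip().strip('"\'')
--             if value == "|":
--                 block_key = key.strip()
--                 block_acc = []
--             else:
--                 fields[key.strip()] = value
--     flush()
--     return fields, body
-- ===== Notes on version B (the rewrite author's own statement) =====
-- stated objective: alternative
-- what changed: Replaces the index-driven outer-while with a nested inner-while over the lines by a single linear for-pass state machine that carries the pending block key and accumulator and flushes it lazily (re-dispatching the terminating line), instead of re-scanning via an index that the inner loop advances.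
import Mathlib
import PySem

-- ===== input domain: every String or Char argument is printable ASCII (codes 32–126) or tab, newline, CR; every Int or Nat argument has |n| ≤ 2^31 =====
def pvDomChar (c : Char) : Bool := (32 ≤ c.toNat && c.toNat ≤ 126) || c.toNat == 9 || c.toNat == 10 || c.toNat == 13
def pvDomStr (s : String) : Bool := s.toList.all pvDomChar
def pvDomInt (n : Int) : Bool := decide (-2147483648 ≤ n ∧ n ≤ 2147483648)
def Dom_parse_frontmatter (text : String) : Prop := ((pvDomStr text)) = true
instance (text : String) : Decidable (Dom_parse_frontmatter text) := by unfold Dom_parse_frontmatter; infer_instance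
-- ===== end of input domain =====

-- B replaces A's outer-while/inner-while index walk by one linear state-machine pass over the lines (objective: alternative decomposition, same cost).

-- shared by both Pythons verbatim: key, _, value = line.partition(":"); key.strip(); value.strip().strip('"\'')
-- (partition ported by hand via the first ':'; exact since it is only used when ':' is in line)
def pvKeyVal (line : String) : String × String :=
  let f := PySem.Str.find line ":"
  (PySem.Str.strip (PySem.Str.slice line none (some f)),
   PySem.Str.stripChars (PySem.Str.strip (PySem.Str.slice line (some (f + 1)) none)) "\"'")

-- ===== PORT A =====
-- inner 'while' collecting a '|' block: returns (block, remaining lines)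
def pvTakeBlockA : List String → List String × List String
  | [] => ([], [])
  | l :: rest =>
    if PySem.Str.startswith l "  " || PySem.Str.strip l == "" then
      let p := pvTakeBlockA rest
      ((if PySem.Str.startswith l "  " then PySem.Str.slice l (some 2) none else "") :: p.1, p.2)
    else ([], l :: rest)

theorem pvTakeBlockA_snd_le (ls : List String) : (pvTakeBlockA ls).2.length ≤ ls.length := by
  induction ls with
  | nil => simp [pvTakeBlockA]
  | cons l rest ih =>
    simp only [pvTakeBlockA]
    split
    · simpa using Nat.le_succ_of_le ih
    · simp

-- outer 'while i < len(lines)' loop of A, as recursion on the suffix of lines from index i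
def pvLoopA (fields : PySem.Dict String String) : List String → PySem.Dict String String
  | [] => fields
  | line :: rest =>
    if PySem.Str.isIn ":" line = false then pvLoopA fields rest
    else
      let kv := pvKeyVal line
      if kv.2 == "|" then
        let p := pvTakeBlockA rest
        pvLoopA (fields.insert kv.1 (PySem.Str.rstrip (PySem.Str.join "\n" p.1))) p.2
      else pvLoopA (fields.insert kv.1 kv.2) rest
termination_by ls => ls.length
decreasing_by
  all_goals first
    | exact Nat.lt_succ_of_le (pvTakeBlockA_snd_le rest)
    | simp

def parse_frontmatter (text : String) : (List (String × String)) × String :=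
  if !PySem.Str.startswith text "---" then ([], text)
  else
    let e := PySem.Str.findFrom text "---" 3
    if e == -1 then ([], text)
    else
      let body := PySem.Str.strip (PySem.Str.slice text (some (e + 3)) none)
      let lines := PySem.Str.splitlines (PySem.Str.strip (PySem.Str.slice text (some 3) (some e)))
      ((pvLoopA PySem.Dict.empty lines).items, body)

-- ===== PORT B =====
-- process one line in normal (non-block) mode
def pvNormalB (fields : PySem.Dict String String) (line : String) :
    PySem.Dict String String × Option (String × List String) :=
  if PySem.Str.isIn ":" line then
    let kv := pvKeyVal line
    if kv.2 == "|" then (fields, some (kv.1, []))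
    else (fields.insert kv.1 kv.2, none)
  else (fields, none)

-- one step of B's state machine: state = (fields, pending block key + accumulated block lines)
def pvStepB (st : PySem.Dict String String × Option (String × List String)) (line : String) :
    PySem.Dict String String × Option (String × List String) :=
  match st with
  | (fields, none) => pvNormalB fields line
  | (fields, some (key, acc)) =>
    if PySem.Str.startswith line "  " then
      (fields, some (key, acc ++ [PySem.Str.slice line (some 2) none]))
    else if PySem.Str.strip line == "" then (fields, some (key, acc ++ [""]))
    else pvNormalB (fields.insert key (PySem.Str.rstrip (PySem.Str.join "\n" acc))) line

def pvFlushB (st : PySem.Dict String String × Option (String × List String)) :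
    PySem.Dict String String :=
  match st with
  | (fields, none) => fields
  | (fields, some (key, acc)) => fields.insert key (PySem.Str.rstrip (PySem.Str.join "\n" acc))

def parse_frontmatter_alt (text : String) : (List (String × String)) × String :=
  if !PySem.Str.startswith text "---" then ([], text)
  else
    let e := PySem.Str.findFrom text "---" 3
    if e == -1 then ([], text)
    else
      let body := PySem.Str.strip (PySem.Str.slice text (some (e + 3)) none)
      let lines := PySem.Str.splitlines (PySem.Str.strip (PySem.Str.slice text (some 3) (some e)))
      ((pvFlushB (lines.foldl pvStepB (PySem.Dict.empty, none))).items, body)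

-- ===== PRECONDITION & SPEC =====
def Spec_parse_frontmatter (text : String) (out : (List (String × String)) × String) : Prop := out = parse_frontmatter_alt text
instance (text : String) (out : (List (String × String)) × String) : Decidable (Spec_parse_frontmatter text out) := by unfold Spec_parse_frontmatter; infer_instance

-- ===== CLAIM (what is proved, stated in full; the proofs are below) =====
def Claim_equal_parse_frontmatter : Prop := ∀ (text : String), Dom_parse_frontmatter text → Spec_parse_frontmatter text (parse_frontmatter text)

-- ===== LEMMAS AND PROOFS =====

-- B folded from a block state = finalize the block A's inner while would collect, then continue in normal mode
theorem pvFoldB_block (ls : List String) : ∀ (fields : PySem.Dict String String) (key : String) (acc : List String),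
    pvFlushB (ls.foldl pvStepB (fields, some (key, acc)))
      = pvFlushB ((pvTakeBlockA ls).2.foldl pvStepB
          (fields.insert key (PySem.Str.rstrip (PySem.Str.join "\n" (acc ++ (pvTakeBlockA ls).1))), none)) := by
  induction ls with
  | nil => intro fields key acc; simp [pvTakeBlockA, pvFlushB]
  | cons l rest ih =>
    intro fields key acc
    by_cases h1 : PySem.Str.startswith l "  " = true
    · simp only [pvTakeBlockA, h1, List.foldl_cons, pvStepB, Bool.true_or, if_pos]
      rw [ih]
      simp
    · simp only [Bool.not_eq_true] at h1
      by_cases h2 : (PySem.Str.strip l == "") = true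
      · simp only [pvTakeBlockA, h1, h2, List.foldl_cons, pvStepB, Bool.false_eq_true, if_false,
          if_true, Bool.false_or]
        rw [ih]
        simp
      · simp only [Bool.not_eq_true] at h2
        simp only [pvTakeBlockA, h1, h2, List.foldl_cons, pvStepB, Bool.false_eq_true, if_false,
          Bool.or_self, List.append_nil]

-- the two loops compute the same dict
theorem pvLoop_eq_fold : ∀ (n : Nat) (ls : List String), ls.length ≤ n → ∀ (fields : PySem.Dict String String),
    pvFlushB (ls.foldl pvStepB (fields, none)) = pvLoopA fields ls := by
  intro n
  induction n with
  | zero =>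
    intro ls h fields
    have hls : ls = [] := List.eq_nil_of_length_eq_zero (Nat.le_zero.mp h)
    subst hls
    simp [pvLoopA, pvFlushB]
  | succ n ih =>
    intro ls h fields
    match ls with
    | [] => simp [pvLoopA, pvFlushB]
    | line :: rest =>
      simp only [List.length_cons, Nat.succ_le_succ_iff] at h
      by_cases hc : PySem.Str.isIn ":" line = true
      · by_cases hv : ((pvKeyVal line).2 == "|") = true
        · simp only [List.foldl_cons, pvStepB, pvNormalB, hc, if_true, hv]
          rw [pvFoldB_block, ih _ (Nat.le_trans (pvTakeBlockA_snd_le rest) h)]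
          simp only [pvLoopA, hc, Bool.true_eq_false, if_false, hv, if_true, List.nil_append]
        · simp only [Bool.not_eq_true] at hv
          simp only [List.foldl_cons, pvStepB, pvNormalB, hc, if_true, hv, Bool.false_eq_true,
            if_false]
          rw [ih _ h]
          simp only [pvLoopA, hc, Bool.true_eq_false, if_false, hv, Bool.false_eq_true]
      · simp only [Bool.not_eq_true] at hc
        simp only [List.foldl_cons, pvStepB, pvNormalB, hc, Bool.false_eq_true, if_false]
        rw [ih _ h]
        simp only [pvLoopA, hc, if_true]

-- ===== VERDICT (by name: the statement is the Claim_ definition above) =====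
theorem parse_frontmatter_spec : Claim_equal_parse_frontmatter := by
  intro text _
  have h : ∀ ls : List String,
      pvFlushB (ls.foldl pvStepB (PySem.Dict.empty, none)) = pvLoopA PySem.Dict.empty ls :=
    fun ls => pvLoop_eq_fold ls.length ls (Nat.le_refl _) PySem.Dict.empty
  unfold Spec_parse_frontmatter parse_frontmatter parse_frontmatter_alt
  simp only [h]
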